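-- pv_equiv track=rewrite | github.com/jakobfranz/5-planar | real_components.py | all_cases
-- ===== SOURCE A (Python) =====
-- def all_cases(options: list[int], length: int, filter: list[int]) -> list[list[int]]:
--     if length == 1:
--         return [[option] for option in options]
--     else:
--         remaining_options = all_cases(options, length - 1, filter)
--         if length - 1 in filter and length - 1 != filter[0]:
--             compare_to_index = filter[filter.index(length - 1) - 1]
--             return [
--                 remaining_option + [option]
--                 for option in options
--                 for remaining_option in remaining_options
--                 if option >= remaining_option[compare_to_index]
--             ]
--         else:
--             return [
--                 remaining_option + [option]
--                 for option in options
--                 for remaining_option in remaining_options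
--             ]
-- ===== SOURCE B (Python) =====
-- def all_cases(options: list[int], length: int, filter: list[int]) -> list[list[int]]:
--     current = [[opt] for opt in options]
--     for size in range(2, length + 1):
--         prev = size - 1
--         idx = filter.index(prev) if prev in filter else 0
--         threshold = filter[idx - 1] if idx > 0 else None
--         current = [seq + [opt]
--                    for opt in options
--                    for seq in current
--                    if threshold is None or opt >= seq[threshold]]
--     return current
-- ===== Notes on version B (the rewrite author's own statement) =====
-- stated objective: alternative
-- what changed: Replaces A's top-down recursion on length with a bottom-up loop over sizes 2..length that folds one extension step per level, and merges A's two comprehension branches by precomputing an optional threshold index per level.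
import Mathlib
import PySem

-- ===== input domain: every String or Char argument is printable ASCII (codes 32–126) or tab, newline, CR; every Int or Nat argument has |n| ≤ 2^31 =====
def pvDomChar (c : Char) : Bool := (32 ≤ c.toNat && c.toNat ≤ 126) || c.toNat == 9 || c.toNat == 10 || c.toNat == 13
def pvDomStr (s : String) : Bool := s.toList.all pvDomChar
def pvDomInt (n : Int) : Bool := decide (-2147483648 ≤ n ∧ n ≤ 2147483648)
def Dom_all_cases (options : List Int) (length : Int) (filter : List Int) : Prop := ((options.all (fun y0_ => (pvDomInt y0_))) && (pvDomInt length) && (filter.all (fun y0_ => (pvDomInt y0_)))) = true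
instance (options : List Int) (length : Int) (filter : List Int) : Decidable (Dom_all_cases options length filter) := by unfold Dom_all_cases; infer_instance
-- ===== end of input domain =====

-- B rebuilds the sequences bottom-up with a loop over the sizes instead of A's top-down
-- recursion (objective: alternative decomposition, same asymptotic cost).
-- ===== PORT A =====
-- literal transliteration of A; the '≤ 1' guard only totalizes the recursion
-- (Python recurses forever for length < 1, which Pre_ excludes).
def all_cases (options : List Int) (length : Int) (filter : List Int) : List (List Int) :=
  if length ≤ 1 then
    options.map (fun option => [option])
  else
    let remaining_options := all_cases options (length - 1) filter
    if (length - 1) ∈ filter ∧ PySem.List.pyGet? filter 0 ≠ some (length - 1) then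
      -- compare_to_index = filter[filter.index(length-1) - 1]; always in range since
      -- filter.index succeeds (membership) and idx-1 wraps to -1 at worst
      let compare_to_index :=
        (PySem.List.pyGet? filter
          ((((PySem.List.index? filter (length - 1)).getD 0 : Nat) : Int) - 1)).getD 0
      options.flatMap (fun option =>
        (remaining_options.filter (fun remaining_option =>
          decide (option ≥ (PySem.List.pyGet? remaining_option compare_to_index).getD 0))).map
          (fun remaining_option => remaining_option ++ [option]))
    else
      options.flatMap (fun option =>
        remaining_options.map (fun remaining_option => remaining_option ++ [option]))
termination_by (length - 1).toNat
decreasing_by simp_wf; omega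

-- ===== PORT B =====
-- one level of B's loop body
def pvStep (options filter_ : List Int) (cur : List (List Int)) (size : Int) : List (List Int) :=
  let prev := size - 1
  let idx : Int := if prev ∈ filter_ then (((PySem.List.index? filter_ prev).getD 0 : Nat) : Int) else 0
  let threshold : Option Int := if 0 < idx then PySem.List.pyGet? filter_ (idx - 1) else none
  options.flatMap (fun opt =>
    (cur.filter (fun seq : List Int =>
      match threshold with
      | none => true
      | some t => decide (opt ≥ (PySem.List.pyGet? seq t).getD 0))).map
      (fun seq => seq ++ [opt]))

def all_cases_alt (options : List Int) (length : Int) (filter : List Int) : List (List Int) :=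
  (PySem.List.pyRange 2 (length + 1) 1).foldl (pvStep options filter)
    (options.map (fun opt => [opt]))

-- ===== PRECONDITION & SPEC =====
-- Pre_ excludes exactly the inputs on which Python A raises: length < 1 (the recursion
-- never reaches the base case) and, when options is nonempty, any firing level whose
-- compare index falls outside that level's prefixes (IndexError); firing levels L are
-- exactly those with L - 1 ∈ filter, so the check quantifies over filter's elements.
-- (CPython's finite recursion-stack depth is an implementation limit, not modeled.)
def Pre_all_cases (options : List Int) (length : Int) (filter : List Int) : Prop :=
  1 ≤ length ∧
  (options = [] ∨
    ∀ v ∈ filter, (1 ≤ v ∧ v < length) →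
      PySem.List.pyGet? filter 0 ≠ some v →
      ∀ t, PySem.List.pyGet? filter
            ((((PySem.List.index? filter v).getD 0 : Nat) : Int) - 1) = some t →
        (-v ≤ t ∧ t < v))
instance (options : List Int) (length : Int) (filter : List Int) : Decidable (Pre_all_cases options length filter) := by unfold Pre_all_cases; infer_instance

def pvWitness_all_cases : List Int × Int × List Int := ([0, 1], 3, [0, 1])

def Spec_all_cases (options : List Int) (length : Int) (filter : List Int) (out : List (List Int)) : Prop := out = all_cases_alt options length filter
instance (options : List Int) (length : Int) (filter : List Int) (out : List (List Int)) : Decidable (Spec_all_cases options length filter out) := by unfold Spec_all_cases; infer_instance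

-- ===== CLAIM (what is proved, stated in full; the proofs are below) =====
def Claim_equal_all_cases : Prop := ∀ (options : List Int) (length : Int) (filter : List Int), Dom_all_cases options length filter → Pre_all_cases options length filter → Spec_all_cases options length filter (all_cases options length filter)

-- ===== LEMMAS AND PROOFS =====

-- one recursive layer of A equals one loop layer of B, on any accumulated list
theorem pvStep_eq (options filter_ : List Int) (cur : List (List Int)) (L : Int) :
    (if (L - 1) ∈ filter_ ∧ PySem.List.pyGet? filter_ 0 ≠ some (L - 1) then
      let compare_to_index :=
        (PySem.List.pyGet? filter_
          ((((PySem.List.index? filter_ (L - 1)).getD 0 : Nat) : Int) - 1)).getD 0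
      options.flatMap (fun option =>
        (cur.filter (fun remaining_option =>
          decide (option ≥ (PySem.List.pyGet? remaining_option compare_to_index).getD 0))).map
          (fun remaining_option => remaining_option ++ [option]))
    else
      options.flatMap (fun option =>
        cur.map (fun remaining_option => remaining_option ++ [option])))
    = pvStep options filter_ cur L := by
  unfold pvStep
  by_cases hm : (L - 1) ∈ filter_
  · obtain ⟨k, hk⟩ := Option.isSome_iff_exists.mp ((PySem.List.index?_isSome_iff filter_ (L-1)).mpr hm)
    obtain ⟨hklen, hkval, hfirst⟩ := PySem.List.getElem_of_index?_eq_some hk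
    rw [PySem.List.index?_eq_idxOf?] at hk
    by_cases hk0 : k = 0
    · subst hk0
      have h0 : PySem.List.pyGet? filter_ 0 = some (L - 1) := by
        rw [PySem.List.pyGet?_zero, List.getElem?_eq_getElem hklen, hkval]
      simp [h0, hm, hk]
    · have hlen0 : 0 < filter_.length := by omega
      have h0 : PySem.List.pyGet? filter_ 0 ≠ some (L - 1) := by
        rw [PySem.List.pyGet?_zero, List.getElem?_eq_getElem hlen0]
        simp only [ne_eq, Option.some.injEq]
        exact hfirst 0 (by omega)
      have hget : PySem.List.pyGet? filter_ ((k : Int) - 1) = some (filter_[k - 1]'(by omega)) := by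
        have h1 : (0:Int) ≤ (k:Int) - 1 := by omega
        have h2 : ((k:Int) - 1) < (filter_.length : Int) := by omega
        have h3 := PySem.List.pyGet?_eq_some_getElem (xs := filter_) h1 h2
        simpa [show ((k:Int)-1).toNat = k - 1 from by omega] using h3
      rw [if_pos ⟨hm, h0⟩]
      simp only [PySem.List.index?_eq_idxOf?, hk, Option.getD_some, if_pos hm]
      rw [if_pos (show (0:Int) < (k:Int) by exact_mod_cast Nat.pos_of_ne_zero hk0), hget]
      simp
  · rw [if_neg (by simp [hm])]
    simp [hm]
theorem all_cases_eq_alt (options filter_ : List Int) (n : Nat) :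
    all_cases options ((n : Int) + 1) filter_ = all_cases_alt options ((n : Int) + 1) filter_ := by
  induction n with
  | zero =>
    rw [all_cases]
    simp [all_cases_alt]
  | succ n ih =>
    push_cast
    have h2 : ¬ (((n:Nat)+1 : Int) + 1 ≤ 1) := by omega
    have step1 : all_cases options (((n:Nat)+1 : Int) + 1) filter_
        = pvStep options filter_ (all_cases options ((((n:Nat)+1 : Int) + 1) - 1) filter_) (((n:Nat)+1 : Int) + 1) := by
      rw [all_cases, if_neg h2]
      exact pvStep_eq options filter_ _ _
    have harg : ((((n:Nat)+1 : Int) + 1) - 1) = ((n:Nat) : Int) + 1 := by ring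
    rw [step1, harg, ih]
    unfold all_cases_alt
    have hsplit : PySem.List.pyRange 2 ((((n:Nat)+1 : Int)) + 1 + 1) 1
        = PySem.List.pyRange 2 (((n:Nat) : Int) + 1 + 1) 1 ++ [((n:Nat) : Int) + 1 + 1] := by
      have := PySem.List.pyRange_one_succ_right (a := 2) (b := ((n:Nat) : Int) + 1 + 1) (by omega)
      rw [show (((n:Nat)+1 : Int)) + 1 + 1 = (((n:Nat) : Int) + 1 + 1) + 1 by ring]
      exact this
    rw [hsplit, List.foldl_append]
    simp

-- ===== VERDICT (by name: the statement is the Claim_ definition above) =====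
theorem all_cases_spec : Claim_equal_all_cases := by
  intro options length filter _ hpre
  unfold Spec_all_cases
  obtain ⟨h1, -⟩ := hpre
  have hn : length = ((length - 1).toNat : Int) + 1 := by omega
  rw [hn]
  exact all_cases_eq_alt options filter (length - 1).toNat
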